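-- pv_equiv track=rewrite | github.com/pypi-data/pypi-mirror-391 | packages/cellarc/cellarc-0.1.1.tar.gz/cellarc-0.1.1/scripts/dataset/pool_filtering.py | has_duplicate_pairs
-- ===== SOURCE A (Python) =====
-- from typing import Dict, Iterable, Iterator, List, Sequence, Tuple
--
-- def has_duplicate_pairs(episode: Dict) -> bool:
--     """Return True if any train I/O pair appears more than once."""
--     seen = set()
--     for example in episode.get("train") or []:
--         if not isinstance(example, dict):
--             continue
--         inp = example.get("input")
--         out = example.get("output")
--         inp_key = tuple(inp) if isinstance(inp, list) else tuple()
--         out_key = tuple(out) if isinstance(out, list) else tuple()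
--         key = (inp_key, out_key)
--         if key in seen:
--             return True
--         seen.add(key)
--     return False
-- ===== SOURCE B (Python) =====
-- def has_duplicate_pairs(episode):
--     """Return True if any train I/O pair appears more than once."""
--     keys = []
--     for ex in episode.get("train") or []:
--         if isinstance(ex, dict):
--             inp = ex.get("input")
--             out = ex.get("output")
--             keys.append((tuple(inp) if isinstance(inp, list) else (),
--                          tuple(out) if isinstance(out, list) else ()))
--     # brute-force: a pair is duplicated iff some key reappears later in the list
--     return any(keys[i] in keys[i + 1:] for i in range(len(keys)))
-- ===== Notes on version B (the rewrite author's own statement) =====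
-- stated objective: alternative
-- what changed: Drops the hash seen-set entirely: B builds the full key list in one pass and then decides duplication by brute-force suffix membership scans (keys[i] in keys[i+1:]), trading A's expected-O(n) hashing for a hash-free O(n^2) pairwise comparison.
import Mathlib
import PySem

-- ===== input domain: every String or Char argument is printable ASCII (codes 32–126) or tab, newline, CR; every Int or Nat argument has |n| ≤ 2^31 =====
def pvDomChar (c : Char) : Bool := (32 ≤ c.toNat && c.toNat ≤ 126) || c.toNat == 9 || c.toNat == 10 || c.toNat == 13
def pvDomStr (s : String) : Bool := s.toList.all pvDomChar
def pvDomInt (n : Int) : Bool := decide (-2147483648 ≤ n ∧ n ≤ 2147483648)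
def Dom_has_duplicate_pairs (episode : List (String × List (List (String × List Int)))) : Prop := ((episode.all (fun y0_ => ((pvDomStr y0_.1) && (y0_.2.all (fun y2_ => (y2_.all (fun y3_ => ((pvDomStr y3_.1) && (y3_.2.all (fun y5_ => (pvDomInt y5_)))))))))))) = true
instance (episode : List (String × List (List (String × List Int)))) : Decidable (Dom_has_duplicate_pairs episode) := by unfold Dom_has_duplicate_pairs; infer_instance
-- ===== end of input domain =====

-- B replaces A's incremental hash seen-set with early return by a hash-free brute force:
-- build the full key list, then detect a duplicate by suffix membership scans; objective: alternative.


-- ===== PORT A =====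
-- A's for-loop over the train examples with the early 'return True'. Under the type
-- convention every element of the train list IS a dict, so the 'isinstance(example, dict)'
-- continue-branch can never fire and is not a branch here; 'tuple(inp) if isinstance(inp, list)
-- else tuple()' is the match on Dict.get? (a present value is always a list of ints).
def hdpLoop : List (List (String × List Int)) → PySem.Set (List Int × List Int) → Bool
  | [], _ => false
  | ex :: rest, seen =>
    let inp := PySem.Dict.get? ⟨ex⟩ "input"
    let out := PySem.Dict.get? ⟨ex⟩ "output"
    let inpKey : List Int := match inp with | some l => l | none => []
    let outKey : List Int := match out with | some l => l | none => []
    let key := (inpKey, outKey)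
    if seen.contains key then true else hdpLoop rest (seen.add key)

def has_duplicate_pairs (episode : List (String × List (List (String × List Int)))) : Bool :=
  -- episode.get("train") or []: a missing key and an empty list both give []
  let train := PySem.Dict.getD ⟨episode⟩ "train" []
  hdpLoop train PySem.Set.empty

-- ===== PORT B =====
def pvPairKey (ex : List (String × List Int)) : List Int × List Int :=
  let inp := PySem.Dict.get? ⟨ex⟩ "input"
  let out := PySem.Dict.get? ⟨ex⟩ "output"
  ((match inp with | some l => l | none => ([] : List Int)),
   (match out with | some l => l | none => ([] : List Int)))

-- 'any(keys[i] in keys[i+1:] for i in range(len(keys)))': each key is looked up in its suffix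
def pvSuffixDup : List (List Int × List Int) → Bool
  | [] => false
  | k :: rest => rest.contains k || pvSuffixDup rest

def has_duplicate_pairs_alt (episode : List (String × List (List (String × List Int)))) : Bool :=
  let train := PySem.Dict.getD ⟨episode⟩ "train" []
  let keys := train.foldl (fun acc ex => acc ++ [pvPairKey ex]) []
  pvSuffixDup keys

-- ===== PRECONDITION & SPEC =====
def Spec_has_duplicate_pairs (episode : List (String × List (List (String × List Int)))) (out : Bool) : Prop := out = has_duplicate_pairs_alt episode
instance (episode : List (String × List (List (String × List Int)))) (out : Bool) : Decidable (Spec_has_duplicate_pairs episode out) := by unfold Spec_has_duplicate_pairs; infer_instance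

-- ===== CLAIM =====
def Claim_equal_has_duplicate_pairs : Prop := ∀ (episode : List (String × List (List (String × List Int)))), Dom_has_duplicate_pairs episode → Spec_has_duplicate_pairs episode (has_duplicate_pairs episode)

-- ===== LEMMAS AND PROOFS =====

-- A's loop with seen-set s answers: does (s ++ remaining keys) contain a repeat?
theorem hdpLoop_eq_decide (exs : List (List (String × List Int)))
    (seen : PySem.Set (List Int × List Int)) (hs : seen.Nodup) :
    hdpLoop exs seen = decide (¬ (seen ++ exs.map pvPairKey).Nodup) := by
  induction exs generalizing seen with
  | nil => simp [hdpLoop, hs]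
  | cons ex rest ih =>
    have hstep : hdpLoop (ex :: rest) seen =
        (if seen.contains (pvPairKey ex) then true
         else hdpLoop rest (seen.add (pvPairKey ex))) := by
      simp only [hdpLoop, pvPairKey]
    rw [hstep, List.map_cons]
    by_cases hmem : pvPairKey ex ∈ seen
    · rw [if_pos ((PySem.Set.contains_iff _ _).mpr hmem)]
      have : ¬ (seen ++ pvPairKey ex :: rest.map pvPairKey).Nodup := by
        intro h
        rcases List.nodup_append.mp h with ⟨-, -, hdis⟩
        exact hdis _ hmem _ (by simp) rfl
      simp [this]
    · rw [if_neg (fun hc => hmem ((PySem.Set.contains_iff _ _).mp hc))]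
      have hadd : seen.add (pvPairKey ex) = seen ++ [pvPairKey ex] := by
        simp only [PySem.Set.add]
        rw [if_neg (fun hc => hmem ((PySem.Set.contains_iff _ _).mp hc))]
      rw [ih (seen.add (pvPairKey ex)) (PySem.Set.nodup_add _ _ hs), hadd,
        List.append_assoc, List.singleton_append]

-- B's suffix scan answers the same question, with no seen-set
theorem pvSuffixDup_eq_decide (ks : List (List Int × List Int)) :
    pvSuffixDup ks = decide (¬ ks.Nodup) := by
  induction ks with
  | nil => simp [pvSuffixDup]
  | cons k rest ih =>
    simp only [pvSuffixDup, ih, List.nodup_cons]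
    by_cases hk : k ∈ rest <;> simp [hk]

theorem foldl_append_singleton (exs : List (List (String × List Int)))
    (acc : List (List Int × List Int)) :
    exs.foldl (fun acc ex => acc ++ [pvPairKey ex]) acc = acc ++ exs.map pvPairKey := by
  induction exs generalizing acc with
  | nil => simp
  | cons ex rest ih => simp [ih]

-- ===== VERDICT =====
theorem has_duplicate_pairs_spec : Claim_equal_has_duplicate_pairs := by
  intro episode _
  unfold Spec_has_duplicate_pairs has_duplicate_pairs has_duplicate_pairs_alt
  simp only []
  rw [hdpLoop_eq_decide _ _ (by simp [PySem.Set.empty]), foldl_append_singleton,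
    pvSuffixDup_eq_decide]
  simp [PySem.Set.empty]
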